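-- pv_equiv track=rewrite | github.com/Nikabidzinashvili7/goa-homework58 | level 34/homework/hw2.py | sort_and_join
-- ===== SOURCE A (Python) =====
-- def sort_and_join(chars):
--
--     for i in range(len(chars)):
--         for j in range(i + 1, len(chars)):
--             if chars[i] > chars[j]:
--                 chars[i], chars[j] = chars[j], chars[i]
--
--
--     result = ""
--     for char in chars:
--         result += char
--
--     return result
-- ===== SOURCE B (Python) =====
-- # Counting sort: one pass builds a frequency dict, then the sorted distinct keys are
-- # written back into chars as runs (write cursor), so chars ends up sorted just like A's
-- # in-place exchange sort; return value is the join.  Faster: O(n + k log k) vs A's O(n^2).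
-- def sort_and_join(chars):
--     counts = {}
--     for c in chars:
--         counts[c] = counts.get(c, 0) + 1
--     i = 0
--     for k in sorted(counts):
--         for _ in range(counts[k]):
--             chars[i] = k
--             i += 1
--     return ''.join(chars)
-- ===== Notes on version B (the rewrite author's own statement) =====
-- stated objective: faster
-- what changed: Replaces the quadratic pairwise compare-and-swap exchange sort (plus repeated string concatenation) by a counting sort: one pass builds a frequency dict, the sorted distinct keys are emitted as runs back into chars, and the result is a single join.
import Mathlib
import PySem

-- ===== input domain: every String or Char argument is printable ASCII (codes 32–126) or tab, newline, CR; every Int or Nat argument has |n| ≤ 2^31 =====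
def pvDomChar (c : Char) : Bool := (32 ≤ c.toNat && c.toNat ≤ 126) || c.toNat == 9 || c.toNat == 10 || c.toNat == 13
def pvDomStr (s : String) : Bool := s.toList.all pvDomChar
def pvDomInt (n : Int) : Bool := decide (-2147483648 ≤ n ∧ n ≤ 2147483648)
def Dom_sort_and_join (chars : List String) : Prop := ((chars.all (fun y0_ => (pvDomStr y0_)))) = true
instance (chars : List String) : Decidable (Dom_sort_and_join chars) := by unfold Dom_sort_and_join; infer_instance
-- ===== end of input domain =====

-- B replaces A's quadratic exchange sort by a counting sort over a frequency dict;
-- the equivalence proved is about the return value (in Python both also leave `chars` sorted).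

-- ===== PORT A =====
-- Inner loop `for j in range(i+1, len(chars)): if chars[i] > chars[j]: swap`:
-- position i holds the carry h, the slots j walk the tail left to right; the branch
-- and the compared values are exactly A's.  Returns (final chars[i], new tail).
def pvInner (h : String) (xs : List String) : String × List String :=
  match xs with
  | [] => (h, [])
  | x :: t =>
    if h > x then
      let r := pvInner x t
      (r.1, h :: r.2)
    else
      let r := pvInner h t
      (r.1, x :: r.2)

theorem pvInner_length (h : String) (xs : List String) :
    (pvInner h xs).2.length = xs.length := by
  induction xs generalizing h with
  | nil => simp [pvInner]
  | cons x t ih => simp only [pvInner]; split_ifs <;> simp [ih]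

-- Outer loop `for i in range(len(chars))`: positions before i are never touched again,
-- so the in-place double loop is the structural recursion peeling one position per step.
def pvOuter (l : List String) : List String :=
  match l with
  | [] => []
  | h :: t =>
    let r := pvInner h t
    r.1 :: pvOuter r.2
termination_by l.length
decreasing_by simp [pvInner_length]

-- result = ""; for char in chars: result += char
def sort_and_join (chars : List String) : String :=
  (pvOuter chars).foldl (fun result char => result ++ char) ""

-- ===== PORT B =====
-- counts[c] = counts.get(c, 0) + 1 over chars; then the write-cursor loop
-- `for k in sorted(counts): for _ in range(counts[k]): chars[i] = k; i += 1`
-- overwrites all of chars front to back (the counts sum to len(chars)), i.e. it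
-- builds exactly the concatenation of the runs; finally ''.join(chars).
def sort_and_join_alt (chars : List String) : String :=
  let counts := chars.foldl (fun d c => d.insert c (d.getD c 0 + 1))
      (PySem.Dict.empty : PySem.Dict String Int)
  let out := (PySem.List.sorted counts.keys (fun x => x) false).flatMap
      (fun k => List.replicate (counts.getD k 0).toNat k)
  PySem.Str.join "" out

-- ===== PRECONDITION & SPEC =====
def Spec_sort_and_join (chars : List String) (out : String) : Prop := out = sort_and_join_alt chars
instance (chars : List String) (out : String) : Decidable (Spec_sort_and_join chars out) := by unfold Spec_sort_and_join; infer_instance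

-- ===== CLAIM (what is proved, stated in full; the proofs are below) =====
def Claim_equal_sort_and_join : Prop := ∀ (chars : List String), Dom_sort_and_join chars → Spec_sort_and_join chars (sort_and_join chars)

-- ===== LEMMAS AND PROOFS =====

theorem pvInner_perm (h : String) (xs : List String) :
    (h :: xs).Perm ((pvInner h xs).1 :: (pvInner h xs).2) := by
  induction xs generalizing h with
  | nil => simp [pvInner]
  | cons x t ih =>
    simp only [pvInner]
    split_ifs with hc
    · exact ((ih x).cons h).trans (List.Perm.swap _ _ _)
    · exact (List.Perm.swap _ _ _).trans (((ih h).cons x).trans (List.Perm.swap _ _ _))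

theorem pvInner_min (h : String) (xs : List String) :
    (pvInner h xs).1 ≤ h ∧ ∀ x ∈ xs, (pvInner h xs).1 ≤ x := by
  induction xs generalizing h with
  | nil => simp [pvInner]
  | cons x t ih =>
    simp only [pvInner]
    split_ifs with hc
    · obtain ⟨h1, h2⟩ := ih x
      refine ⟨le_trans h1 (le_of_lt hc), ?_⟩
      intro y hy
      rcases List.mem_cons.mp hy with rfl | hy
      · exact h1
      · exact h2 y hy
    · obtain ⟨h1, h2⟩ := ih h
      refine ⟨h1, ?_⟩
      intro y hy
      rcases List.mem_cons.mp hy with rfl | hy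
      · exact le_trans h1 (not_lt.mp hc)
      · exact h2 y hy

theorem pvOuter_perm (l : List String) : (pvOuter l).Perm l := by
  fun_induction pvOuter with
  | case1 => simp
  | case2 h t r ih =>
    exact ((ih.cons r.1).trans (pvInner_perm h t).symm).symm.symm

theorem pvOuter_sorted (l : List String) :
    (pvOuter l).Pairwise (fun a b => a ≤ b) := by
  fun_induction pvOuter with
  | case1 => simp
  | case2 h t r ih =>
    refine List.pairwise_cons.mpr ⟨?_, ih⟩
    intro y hy
    have hy2 : y ∈ r.1 :: r.2 :=
      List.mem_cons_of_mem _ ((pvOuter_perm r.2).mem_iff.mp hy)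
    have hmem : y ∈ h :: t := (pvInner_perm h t).mem_iff.mpr hy2
    obtain ⟨h1, h2⟩ := pvInner_min h t
    rcases List.mem_cons.mp hmem with rfl | hmem
    · exact h1
    · exact h2 y hmem

theorem pv_foldl_append_toList (l : List String) (s : String) :
    (l.foldl (fun r c => r ++ c) s).toList = s.toList ++ (l.map String.toList).flatten := by
  induction l generalizing s with
  | nil => simp
  | cons x t ih => simp [List.foldl, ih]

theorem pv_join_nil_flatten (L : List (List Char)) : PySem.Chars.join [] L = L.flatten := by
  induction L with
  | nil => simp [PySem.Chars.join_nil]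
  | cons x t ih =>
    cases t with
    | nil => simp [PySem.Chars.join_singleton]
    | cons y u => simp only [PySem.Chars.join_cons_cons, ih]; simp

theorem pv_count_flatMap_replicate (ks : List String) (c : String → Nat) (a : String)
    (hnd : ks.Nodup) :
    ((ks.flatMap (fun k => List.replicate (c k) k)).count a) = if a ∈ ks then c a else 0 := by
  induction ks with
  | nil => simp
  | cons k t ih =>
    rcases List.nodup_cons.mp hnd with ⟨hk, hnd'⟩
    simp only [List.flatMap_cons, List.count_append, List.count_replicate, ih hnd']
    by_cases hak : a = k
    · subst hak
      simp [hk]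
    · simp [hak, Ne.symm hak]

theorem pv_flatMap_pairwise (ks : List String) (c : String → Nat)
    (h : ks.Pairwise (fun a b => a < b)) :
    (ks.flatMap (fun k => List.replicate (c k) k)).Pairwise (fun a b => a ≤ b) := by
  induction ks with
  | nil => simp
  | cons k t ih =>
    rcases List.pairwise_cons.mp h with ⟨hk, ht⟩
    simp only [List.flatMap_cons]
    refine List.pairwise_append.mpr ⟨?_, ih ht, ?_⟩
    · refine List.pairwise_of_forall_mem_list ?_
      intro a ha b hb
      rw [List.eq_of_mem_replicate ha, List.eq_of_mem_replicate hb]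
    · intro a ha b hb
      rw [List.eq_of_mem_replicate ha]
      obtain ⟨k', hk', hbk⟩ := List.mem_flatMap.mp hb
      rw [List.eq_of_mem_replicate hbk]
      exact le_of_lt (hk k' hk')

-- ===== VERDICT (by name: the statement is the Claim_ definition above) =====
theorem sort_and_join_spec : Claim_equal_sort_and_join := by
  intro chars _
  unfold Spec_sort_and_join sort_and_join sort_and_join_alt
  simp only [PySem.Dict.foldl_insert_getD_add_one_eq_counter, PySem.Dict.keys_counter,
    PySem.Dict.getD_counter, Int.toNat_natCast]
  set ks := PySem.List.sorted (PySem.Set.ofList chars) (fun x => x) false with hks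
  have hlt : ks.Pairwise (fun a b => a < b) := PySem.List.sorted_ofList_pairwise_lt chars
  have hnd : ks.Nodup := hlt.imp (fun h => ne_of_lt h)
  have hmem : ∀ a, a ∈ ks ↔ a ∈ chars := by
    intro a
    rw [hks, PySem.List.mem_sorted, PySem.Set.mem_ofList]
  set ys := ks.flatMap (fun k => List.replicate (chars.count k) k) with hys
  have hperm : ys.Perm chars := by
    refine List.perm_iff_count.mpr ?_
    intro a
    rw [hys, pv_count_flatMap_replicate _ _ _ hnd]
    by_cases h : a ∈ chars
    · simp [hmem, h]
    · simp [hmem, h, List.count_eq_zero_of_not_mem h]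
  have hpair : ys.Pairwise (fun a b => a ≤ b) := pv_flatMap_pairwise ks _ hlt
  have houter : pvOuter chars = ys := by
    rw [← PySem.List.sorted_id_eq_of_perm_of_pairwise chars (pvOuter chars)
          (pvOuter_perm chars) (pvOuter_sorted chars),
        PySem.List.sorted_id_eq_of_perm_of_pairwise chars ys hperm hpair]
  rw [← String.toList_inj, pv_foldl_append_toList, houter, PySem.Str.toList_join]
  simp [pv_join_nil_flatten]
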